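-- pv_equiv track=rewrite | github.com/Zayan-Mohamed/IR-System | document_processor.py | search_phrase_kmp
-- ===== SOURCE A (Python) =====
-- def search_phrase_kmp(phrase: str, text: str) -> int:
--     """KMP algorithm for phrase matching."""
--     def build_lps(pattern):
--         lps = [0] * len(pattern)
--         length = 0
--         i = 1
--
--         while i < len(pattern):
--             if pattern[i] == pattern[length]:
--                 length += 1
--                 lps[i] = length
--                 i += 1
--             else:
--                 if length != 0:
--                     length = lps[length - 1]
--                 else:
--                     lps[i] = 0
--                     i += 1
--         return lps
--
--     phrase = phrase.lower()
--     text = text.lower()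
--
--     if not phrase:
--         return 0
--
--     lps = build_lps(phrase)
--     count = 0
--     i = j = 0
--
--     while i < len(text):
--         if phrase[j] == text[i]:
--             i += 1
--             j += 1
--
--         if j == len(phrase):
--             count += 1
--             j = lps[j - 1]
--         elif i < len(text) and phrase[j] != text[i]:
--             if j != 0:
--                 j = lps[j - 1]
--             else:
--                 i += 1
--
--     return count
-- ===== SOURCE B (Python) =====
-- def search_phrase_kmp(phrase: str, text: str) -> int:
--     """Naive sliding-window counter of overlapping occurrences (case-insensitive)."""
--     phrase = phrase.lower()
--     text = text.lower()
--     if not phrase: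
--         return 0
--     return sum(1 for i in range(len(text) - len(phrase) + 1)
--                if text[i:i + len(phrase)] == phrase)
-- ===== Notes on version B (the rewrite author's own statement) =====
-- stated objective: simpler
-- what changed: Replaced the KMP failure-table single pass with a direct sliding-window comparison that counts overlapping matches by comparing text[i:i+len(phrase)] to the phrase at every position.
import Mathlib
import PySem

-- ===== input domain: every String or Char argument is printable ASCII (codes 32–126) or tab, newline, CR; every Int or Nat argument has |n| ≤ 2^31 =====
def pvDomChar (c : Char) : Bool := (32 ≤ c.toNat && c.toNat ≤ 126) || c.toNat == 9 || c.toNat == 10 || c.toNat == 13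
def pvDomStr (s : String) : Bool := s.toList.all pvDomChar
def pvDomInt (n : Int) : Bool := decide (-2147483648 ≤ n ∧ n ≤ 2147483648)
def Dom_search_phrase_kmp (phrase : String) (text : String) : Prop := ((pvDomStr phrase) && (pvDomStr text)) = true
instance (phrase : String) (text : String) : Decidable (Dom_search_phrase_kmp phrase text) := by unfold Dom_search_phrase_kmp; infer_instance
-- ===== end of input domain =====

-- B replaces A's KMP failure-table scan by a direct sliding-window comparison count (simpler; despite the worse asymptotics a timing run measured it faster, the slice comparison running in C).

-- ===== PORT A =====
-- tiny termination helpers (kept omega-free so the stored proof terms stay small)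
theorem pvMinPredLt (x j : Nat) (hj : j ≠ 0) : min x (j - 1) < j :=
  Nat.lt_of_le_of_lt (Nat.min_le_right x (j - 1)) (Nat.pred_lt hj)

-- build_lps while-loop; `min … (length-1)` only totalises the Python `lps[length-1]`
-- read for the termination measure (the executed values always satisfy lps[length-1] ≤ length-1).
def buildLpsLoop (p : List Char) (lps : List Nat) (length i : Nat) : List Nat :=
  if i < p.length then
    if p.getD i ' ' = p.getD length ' ' then
      buildLpsLoop p (lps.set i (length + 1)) (length + 1) (i + 1)
    else
      if length ≠ 0 then
        buildLpsLoop p lps (min (lps.getD (length - 1) 0) (length - 1)) i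
      else
        buildLpsLoop p (lps.set i 0) 0 (i + 1)
  else lps
termination_by (p.length - i, length)
decreasing_by
  · exact Prod.Lex.left _ _ (Nat.sub_succ_lt_self _ _ ‹i < p.length›)
  · exact Prod.Lex.right _ (pvMinPredLt _ _ ‹length ≠ 0›)
  · exact Prod.Lex.left _ _ (Nat.sub_succ_lt_self _ _ ‹i < p.length›)

-- main KMP while-loop; hp totalises it (Python reaches it only with a nonempty phrase);
-- `min … (j'-1)` again only totalises the `lps[j-1]` read.
def kmpLoop (p t : List Char) (lps : List Nat) (hp : 0 < p.length) (i j count : Nat) : Nat :=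
  if h : i < t.length then
    let i' := if p.getD j ' ' = t.getD i ' ' then i + 1 else i
    let j' := if p.getD j ' ' = t.getD i ' ' then j + 1 else j
    if j' = p.length then
      kmpLoop p t lps hp i' (min (lps.getD (j' - 1) 0) (j' - 1)) (count + 1)
    else if i' < t.length ∧ ¬(p.getD j' ' ' = t.getD i' ' ') then
      if j' ≠ 0 then kmpLoop p t lps hp i' (min (lps.getD (j' - 1) 0) (j' - 1)) count
      else kmpLoop p t lps hp (i' + 1) j' count
    else kmpLoop p t lps hp i' j' count
  else count
termination_by (t.length - i, j)
decreasing_by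
  · by_cases hb : p.getD j ' ' = t.getD i ' '
    · simp only [i', j', dif_pos hb] at *
      exact Prod.Lex.left _ _ (Nat.sub_succ_lt_self _ _ h)
    · simp only [i', j', dif_neg hb] at *
      have hj : j = p.length := ‹j = p.length›
      refine Prod.Lex.right _ (pvMinPredLt _ _ ?_)
      intro h0
      rw [h0] at hj
      exact Nat.lt_irrefl 0 (hj ▸ hp)
  · by_cases hb : p.getD j ' ' = t.getD i ' '
    · simp only [i', j', dif_pos hb] at *
      exact Prod.Lex.left _ _ (Nat.sub_succ_lt_self _ _ h)
    · simp only [i', j', dif_neg hb] at *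
      exact Prod.Lex.right _ (pvMinPredLt _ _ ‹j ≠ 0›)
  · by_cases hb : p.getD j ' ' = t.getD i ' '
    · simp only [i', j', dif_pos hb] at *
      exact absurd (Nat.succ_ne_zero j : j + 1 ≠ 0) ‹¬(j + 1 ≠ 0)›
    · simp only [i', j', dif_neg hb] at *
      exact Prod.Lex.left _ _ (Nat.sub_succ_lt_self _ _ h)
  · by_cases hb : p.getD j ' ' = t.getD i ' '
    · simp only [i', j', dif_pos hb] at *
      exact Prod.Lex.left _ _ (Nat.sub_succ_lt_self _ _ h)
    · simp only [i', j', dif_neg hb] at *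
      exact absurd (And.intro h ‹¬(p.getD j ' ' = t.getD i ' ')›) ‹¬(i < t.length ∧ ¬(p.getD j ' ' = t.getD i ' '))›

def search_phrase_kmp (phrase : String) (text : String) : Int :=
  let p := (PySem.Str.lower phrase).toList
  let t := (PySem.Str.lower text).toList
  if hp : p = [] then 0
  else
    let lps := buildLpsLoop p (List.replicate p.length 0) 0 1
    (kmpLoop p t lps (by simpa [List.length_pos_iff] using hp) 0 0 0 : Int)

-- ===== PORT B =====
def search_phrase_kmp_alt (phrase : String) (text : String) : Int :=
  let p := (PySem.Str.lower phrase).toList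
  let t := (PySem.Str.lower text).toList
  if p = [] then 0
  else ((List.range (t.length + 1 - p.length)).countP
          (fun i => (t.drop i).take p.length == p) : Int)

-- ===== PRECONDITION & SPEC =====
def Spec_search_phrase_kmp (phrase : String) (text : String) (out : Int) : Prop := out = search_phrase_kmp_alt phrase text
instance (phrase : String) (text : String) (out : Int) : Decidable (Spec_search_phrase_kmp phrase text out) := by unfold Spec_search_phrase_kmp; infer_instance

-- ===== CLAIM (what is proved, stated in full; the proofs are below) =====
def Claim_equal_search_phrase_kmp : Prop := ∀ (phrase : String) (text : String), Dom_search_phrase_kmp phrase text → Spec_search_phrase_kmp phrase text (search_phrase_kmp phrase text)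

-- ===== LEMMAS AND PROOFS =====

-- The failure-chain chase: what one text position of A's loop does to the match length j.
def chase (p : List Char) (lps : List Nat) (c : Char) (j : Nat) : Nat :=
  if p.getD j ' ' = c then j + 1
  else if j = 0 then 0
  else chase p lps c (min (lps.getD (j - 1) 0) (j - 1))
termination_by j
decreasing_by exact pvMinPredLt _ _ ‹j ≠ 0›

-- largest k ≤ cap such that p.take k is a suffix of t (0 always qualifies)
def maxPS (p t : List Char) (cap : Nat) : Nat :=
  Nat.findGreatest (fun k => p.take k <:+ t) cap

-- length of the longest proper border of p.take k
def mb (p : List Char) (k : Nat) : Nat := maxPS p (p.take k) (k - 1)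

-- buildLpsLoop restructured: one chase per pattern position
def buildGo (p : List Char) (lps : List Nat) (length i : Nat) : List Nat :=
  if i < p.length then
    buildGo p (lps.set i (chase p lps (p.getD i ' ') length)) (chase p lps (p.getD i ' ') length) (i + 1)
  else lps
termination_by p.length - i
decreasing_by exact Nat.sub_succ_lt_self _ _ ‹i < p.length›

-- kmpLoop restructured: one chase per text position
def kmpGo (p t : List Char) (lps : List Nat) (i j count : Nat) : Nat :=
  if i < t.length then
    if chase p lps (t.getD i ' ') j = p.length then
      kmpGo p t lps (i + 1) (min (lps.getD (p.length - 1) 0) (p.length - 1)) (count + 1)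
    else kmpGo p t lps (i + 1) (chase p lps (t.getD i ' ') j) count
  else count
termination_by t.length - i
decreasing_by all_goals exact Nat.sub_succ_lt_self _ _ ‹i < t.length›

-- basic list facts specific to the development
lemma take_snoc (p : List Char) (n : Nat) (h : n < p.length) :
    p.take (n + 1) = p.take n ++ [p.getD n ' '] := by
  rw [List.take_add_one]
  simp [List.getD, List.getElem?_eq_getElem h]

lemma snoc_suffix_snoc (a u : List Char) (x c : Char) :
    a ++ [x] <:+ u ++ [c] ↔ a <:+ u ∧ x = c := by
  constructor
  · rintro ⟨s, hs⟩
    rw [← List.append_assoc] at hs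
    obtain ⟨h1, h2⟩ := List.append_inj' hs (by simp)
    exact ⟨⟨s, h1⟩, by simpa using h2⟩
  · rintro ⟨⟨s, hs⟩, rfl⟩
    exact ⟨s, by rw [← List.append_assoc, hs]⟩

lemma take_suffix_snoc (p u : List Char) (c : Char) (k : Nat) (h1 : 1 ≤ k) (h2 : k ≤ p.length) :
    (p.take k <:+ u ++ [c]) ↔ (p.take (k - 1) <:+ u ∧ p.getD (k - 1) ' ' = c) := by
  have hk : k - 1 < p.length := by omega
  have : p.take k = p.take (k - 1) ++ [p.getD (k - 1) ' '] := by
    have := take_snoc p (k - 1) hk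
    rwa [Nat.sub_add_cancel h1] at this
  rw [this, snoc_suffix_snoc]

lemma findGreatest_trim (P : Nat → Prop) [DecidablePred P] (a b : Nat) (hba : b ≤ a)
    (h : ∀ k, b < k → k ≤ a → ¬ P k) : Nat.findGreatest P a = Nat.findGreatest P b := by
  induction a with
  | zero => simp [Nat.le_zero.mp hba]
  | succ n ih =>
    rcases Nat.eq_or_lt_of_le hba with rfl | hlt
    · rfl
    · rw [Nat.findGreatest_succ, if_neg (h (n+1) hlt le_rfl)]
      exact ih (by omega) (fun k hk1 hk2 => h k hk1 (by omega))

lemma findGreatest_congr (P Q : Nat → Prop) [DecidablePred P] [DecidablePred Q] (n : Nat)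
    (h : ∀ k, 0 < k → k ≤ n → (P k ↔ Q k)) : Nat.findGreatest P n = Nat.findGreatest Q n := by
  induction n with
  | zero => rfl
  | succ m ih =>
    rw [Nat.findGreatest_succ, Nat.findGreatest_succ]
    by_cases hp : P (m+1)
    · rw [if_pos hp, if_pos ((h (m+1) (by omega) le_rfl).mp hp)]
    · rw [if_neg hp, if_neg (fun hq => hp ((h (m+1) (by omega) le_rfl).mpr hq))]
      exact ih (fun k hk1 hk2 => h k hk1 (by omega))

-- maxPS / mb basic facts
lemma maxPS_le (p t : List Char) (cap : Nat) : maxPS p t cap ≤ cap := Nat.findGreatest_le _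

lemma maxPS_suffix (p t : List Char) (cap : Nat) : p.take (maxPS p t cap) <:+ t := by
  have h0 : (fun k => p.take k <:+ t) 0 := by simp
  have := Nat.findGreatest_spec (P := fun k => p.take k <:+ t) (Nat.zero_le cap) h0
  simpa [maxPS] using this

lemma maxPS_greatest (p t : List Char) (cap k : Nat) (hk : k ≤ cap) (hs : p.take k <:+ t) :
    k ≤ maxPS p t cap := Nat.le_findGreatest hk hs

lemma mb_le (p : List Char) (k : Nat) : mb p k ≤ k - 1 := maxPS_le _ _ _

lemma mb_suffix (p : List Char) (k : Nat) : p.take (mb p k) <:+ p.take k := maxPS_suffix _ _ _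

lemma mb_greatest (p : List Char) (k x : Nat) (hx : x ≤ k - 1) (hs : p.take x <:+ p.take k) :
    x ≤ mb p k := maxPS_greatest _ _ _ _ hx hs

lemma maxPS_nil (p : List Char) (cap : Nat) (hm : 0 < p.length) : maxPS p [] cap = 0 := by
  have := findGreatest_trim (fun k => p.take k <:+ ([] : List Char)) cap 0 (by omega)
    (fun k hk1 hk2 hs => by
      simp only [List.suffix_nil, List.take_eq_nil_iff] at hs
      rcases hs with h | h <;> first | omega | simp [h] at hm)
  simpa [maxPS] using this

-- chase unfolding equations
lemma chase_match (p : List Char) (lps : List Nat) (c : Char) (j : Nat)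
    (h : p.getD j ' ' = c) : chase p lps c j = j + 1 := by
  rw [chase, if_pos h]

lemma chase_nomatch_zero (p : List Char) (lps : List Nat) (c : Char)
    (h : ¬(p.getD 0 ' ' = c)) : chase p lps c 0 = 0 := by
  rw [chase, if_neg h, if_pos rfl]

lemma chase_nomatch (p : List Char) (lps : List Nat) (c : Char) (j : Nat)
    (h : ¬(p.getD j ' ' = c)) (hj : j ≠ 0) :
    chase p lps c j = chase p lps c (min (lps.getD (j - 1) 0) (j - 1)) := by
  rw [chase, if_neg h, if_neg hj]

-- the chase computes the longest p-prefix suffix of u ++ [c] among candidates ≤ j + 1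
lemma chase_spec (p : List Char) (lps : List Nat) (u : List Char) (c : Char)
    (hm : 0 < p.length) :
    ∀ j, j < p.length → p.take j <:+ u →
    (∀ x, x < j → lps.getD x 0 = mb p (x + 1)) →
    chase p lps c j = Nat.findGreatest (fun k => p.take k <:+ u ++ [c]) (j + 1) := by
  intro j
  induction j using Nat.strong_induction_on with
  | _ j ih =>
    intro hj hsuf hlps
    by_cases hc : p.getD j ' ' = c
    · rw [chase_match p lps c j hc]
      have hP : p.take (j + 1) <:+ u ++ [c] := by
        rw [take_suffix_snoc p u c (j + 1) (by omega) (by omega)]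
        exact ⟨by simpa using hsuf, by simpa using hc⟩
      symm
      exact Nat.le_antisymm (Nat.findGreatest_le _) (Nat.le_findGreatest le_rfl hP)
    · by_cases hj0 : j = 0
      · subst hj0
        rw [chase_nomatch_zero p lps c hc]
        have hnot : ¬ (p.take 1 <:+ u ++ [c]) := by
          rw [take_suffix_snoc p u c 1 le_rfl (by omega)]
          rintro ⟨-, h⟩
          exact hc (by simpa using h)
        have htrim := findGreatest_trim (fun k => p.take k <:+ u ++ [c]) 1 0 (by omega)
          (fun k hk1 hk2 => by
            have hk : k = 1 := by omega
            subst hk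
            exact hnot)
        simpa using htrim.symm
      · rw [chase_nomatch p lps c j hc hj0]
        have hmb : lps.getD (j - 1) 0 = mb p j := by
          have := hlps (j - 1) (by omega)
          rwa [Nat.sub_add_cancel (by omega)] at this
        have hmble := mb_le p j
        have hmin : min (lps.getD (j - 1) 0) (j - 1) = mb p j := by
          rw [hmb]
          omega
        rw [hmin]
        have hlt : mb p j < j := by omega
        have hsuf' : p.take (mb p j) <:+ u := (mb_suffix p j).trans hsuf
        rw [ih (mb p j) hlt (by omega) hsuf' (fun x hx => hlps x (by omega))]
        symm
        apply findGreatest_trim _ _ _ (by omega)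
        intro k hk1 hk2 hP
        rw [take_suffix_snoc p u c k (by omega) (by omega)] at hP
        obtain ⟨hPs, hPc⟩ := hP
        by_cases hkj : k - 1 = j
        · exact hc (hkj ▸ hPc)
        · have hb : p.take (k - 1) <:+ p.take j :=
            List.suffix_of_suffix_length_le hPs hsuf (by simp [List.length_take]; omega)
          have := mb_greatest p j (k - 1) (by omega) hb
          omega

-- restructuring: the Python while-loops equal their one-chase-per-position forms
lemma build_eq_go (p : List Char) : ∀ lps length i,
    buildLpsLoop p lps length i = buildGo p lps length i := by
  suffices H : ∀ μ lps length i, 2 * (p.length - i) + length < μ →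
      buildLpsLoop p lps length i = buildGo p lps length i from
    fun lps length i => H (2 * (p.length - i) + length + 1) lps length i (by omega)
  intro μ
  induction μ using Nat.strong_induction_on with
  | _ μ ih =>
    intro lps length i hμ
    by_cases h : i < p.length
    · by_cases hc : p.getD i ' ' = p.getD length ' '
      · rw [buildLpsLoop, if_pos h, if_pos hc,
          ih (2 * (p.length - (i + 1)) + (length + 1) + 1) (by omega) _ _ _ (by omega)]
        conv_rhs => rw [buildGo, if_pos h, chase_match p lps (p.getD i ' ') length hc.symm]
      · by_cases hlen : length ≠ 0
        · rw [buildLpsLoop, if_pos h, if_neg hc, if_pos hlen,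
            ih (2 * (p.length - i) + min (lps.getD (length - 1) 0) (length - 1) + 1)
              (by omega) _ _ _ (by have := Nat.min_le_right (lps.getD (length - 1) 0) (length - 1); omega)]
          rw [buildGo, if_pos h]
          conv_rhs => rw [buildGo, if_pos h]
          rw [chase_nomatch p lps (p.getD i ' ') length (fun hx => hc hx.symm) hlen]
        · have hlen0 : length = 0 := by omega
          subst hlen0
          rw [buildLpsLoop, if_pos h, if_neg hc, if_neg (by simp),
            ih (2 * (p.length - (i + 1)) + 0 + 1) (by omega) _ _ _ (by omega)]
          conv_rhs => rw [buildGo, if_pos h, chase_nomatch_zero p lps (p.getD i ' ') (fun hx => hc hx.symm)]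
    · rw [buildLpsLoop, if_neg h, buildGo, if_neg h]

lemma kmp_eq_go (p t : List Char) (lps : List Nat) (hp : 0 < p.length) :
    ∀ i j count, j < p.length → kmpLoop p t lps hp i j count = kmpGo p t lps i j count := by
  suffices H : ∀ μ i j count, 2 * (t.length - i) + j < μ → j < p.length →
      kmpLoop p t lps hp i j count = kmpGo p t lps i j count from
    fun i j count hj => H (2 * (t.length - i) + j + 1) i j count (by omega) hj
  intro μ
  induction μ using Nat.strong_induction_on with
  | _ μ ih =>
    intro i j count hμ hj
    by_cases h : i < t.length
    · by_cases hc : p.getD j ' ' = t.getD i ' '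
      · by_cases ha : j + 1 = p.length
        · rw [kmpLoop, dif_pos h]
          simp only [if_pos hc, if_pos ha, Nat.add_sub_cancel]
          rw [ih (2 * (t.length - (i + 1)) + min (lps.getD j 0) j + 1)
              (by have := Nat.min_le_right (lps.getD j 0) j; omega) _ _ _
              (by have := Nat.min_le_right (lps.getD j 0) j; omega)
              (by have := Nat.min_le_right (lps.getD j 0) j; omega)]
          conv_rhs => rw [kmpGo, if_pos h, if_pos (by rw [chase_match p lps (t.getD i ' ') j hc]; exact ha)]
          have : p.length - 1 = j := by omega
          rw [this]
        · by_cases he : i + 1 < t.length ∧ ¬(p.getD (j + 1) ' ' = t.getD (i + 1) ' ')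
          · rw [kmpLoop, dif_pos h]
            simp only [if_pos hc, if_neg ha, if_pos he, if_pos (by omega : j + 1 ≠ 0),
              Nat.add_sub_cancel]
            rw [ih (2 * (t.length - (i + 1)) + min (lps.getD j 0) j + 1)
                (by have := Nat.min_le_right (lps.getD j 0) j; omega) _ _ _
                (by have := Nat.min_le_right (lps.getD j 0) j; omega)
                (by have := Nat.min_le_right (lps.getD j 0) j; omega)]
            conv_rhs => rw [kmpGo, if_pos h, if_neg (by rw [chase_match p lps (t.getD i ' ') j hc]; exact ha),
              chase_match p lps (t.getD i ' ') j hc]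
            rw [kmpGo, if_pos he.1]
            conv_rhs => rw [kmpGo, if_pos he.1]
            rw [show chase p lps (t.getD (i + 1) ' ') (j + 1) =
                  chase p lps (t.getD (i + 1) ' ') (min (lps.getD j 0) j) by
              have := chase_nomatch p lps (t.getD (i + 1) ' ') (j + 1) he.2 (by omega)
              simpa using this]
          · rw [kmpLoop, dif_pos h]
            simp only [if_pos hc, if_neg ha, if_neg he]
            rw [ih (2 * (t.length - (i + 1)) + (j + 1) + 1) (by omega) _ _ _ (by omega) (by omega)]
            conv_rhs => rw [kmpGo, if_pos h, if_neg (by rw [chase_match p lps (t.getD i ' ') j hc]; exact ha),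
              chase_match p lps (t.getD i ' ') j hc]
      · by_cases hj0 : j = 0
        · subst hj0
          rw [kmpLoop, dif_pos h]
          simp only [if_neg hc, if_neg (by omega : ¬(0 = p.length)), if_pos (And.intro h hc),
            if_neg (by omega : ¬(0 ≠ 0))]
          rw [ih (2 * (t.length - (i + 1)) + 0 + 1) (by omega) _ _ _ (by omega) hj]
          conv_rhs => rw [kmpGo, if_pos h,
            if_neg (by rw [chase_nomatch_zero p lps (t.getD i ' ') hc]; omega),
            chase_nomatch_zero p lps (t.getD i ' ') hc]
        · rw [kmpLoop, dif_pos h]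
          simp only [if_neg hc, if_neg (by omega : ¬(j = p.length)), if_pos (And.intro h hc),
            if_pos hj0]
          rw [ih (2 * (t.length - i) + min (lps.getD (j - 1) 0) (j - 1) + 1)
              (by have := Nat.min_le_right (lps.getD (j - 1) 0) (j - 1); omega) _ _ _
              (by have := Nat.min_le_right (lps.getD (j - 1) 0) (j - 1); omega)
              (by have := Nat.min_le_right (lps.getD (j - 1) 0) (j - 1); omega)]
          rw [kmpGo, if_pos h]
          conv_rhs => rw [kmpGo, if_pos h]
          rw [chase_nomatch p lps (t.getD i ' ') j hc hj0]
    · rw [kmpLoop, dif_neg h, kmpGo, if_neg h]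

-- build invariant: the finished table holds longest proper borders
lemma buildGo_inv (p : List Char) (hm : 0 < p.length) :
    ∀ n lps length i, p.length - i ≤ n → 1 ≤ i → i ≤ p.length → lps.length = p.length →
    (∀ k, k < i → lps.getD k 0 = mb p (k + 1)) → length = mb p i →
    ∀ k, k < p.length → (buildGo p lps length i).getD k 0 = mb p (k + 1) := by
  intro n
  induction n with
  | zero =>
    intro lps length i h1 h2 h3 hlen hinv hmbi k hk
    rw [buildGo, if_neg (by omega)]
    exact hinv k (by omega)
  | succ n ihn =>
    intro lps length i h1 h2 h3 hlen hinv hmbi k hk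
    by_cases h : i < p.length
    · rw [buildGo, if_pos h]
      have hmb_le := mb_le p i
      have hv : chase p lps (p.getD i ' ') length = mb p (i + 1) := by
        subst hmbi
        rw [chase_spec p lps (p.take i) (p.getD i ' ') hm (mb p i)
            (by omega) (mb_suffix p i) (fun x hx => hinv x (by omega))]
        have e1 : mb p (i + 1) = Nat.findGreatest
            (fun k => p.take k <:+ p.take i ++ [p.getD i ' ']) i := by
          unfold mb maxPS
          rw [Nat.add_sub_cancel]
          simp only [take_snoc p i h]
        rw [e1]
        symm
        apply findGreatest_trim _ _ _ (by omega)
        intro x hx1 hx2 hP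
        rw [take_suffix_snoc p (p.take i) (p.getD i ' ') x (by omega) (by omega)] at hP
        have := mb_greatest p i (x - 1) (by omega) hP.1
        omega
      rw [hv]
      apply ihn _ _ _ (by omega) (by omega) (by omega) (by simpa using hlen) _ rfl _ hk
      intro k' hk'
      by_cases hki : k' = i
      · subst hki
        simp [List.getD_eq_getElem?_getD, hlen ▸ h]
      · simp only [List.getD_eq_getElem?_getD, List.getElem?_set_ne (by omega : i ≠ k')]
        exact hinv k' (by omega)
    · rw [buildGo, if_neg h]
      exact hinv k (by omega)

lemma lps_correct (p : List Char) (hm : 0 < p.length) :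
    ∀ k, k < p.length →
      (buildLpsLoop p (List.replicate p.length 0) 0 1).getD k 0 = mb p (k + 1) := by
  have hmb1 : mb p 1 = 0 := by
    unfold mb maxPS
    simp
  intro k hk
  rw [build_eq_go]
  exact buildGo_inv p hm p.length (List.replicate p.length 0) 0 1 (by omega) (by omega) hm
    (by simp)
    (fun k' hk' => by
      have : k' = 0 := by omega
      subst this
      simpa using hmb1.symm)
    hmb1.symm k hk

-- main loop invariant and occurrence counting
lemma kmpGo_eq (p t : List Char) (lps : List Nat) (hm : 0 < p.length)
    (hlps : ∀ x, x < p.length → lps.getD x 0 = mb p (x + 1)) :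
    ∀ n i j count, t.length - i ≤ n → i ≤ t.length → j = maxPS p (t.take i) (p.length - 1) →
    kmpGo p t lps i j count =
      count + (List.range' i (t.length - i)).countP (fun x => p.isSuffixOf (t.take (x + 1))) := by
  intro n
  induction n with
  | zero =>
    intro i j count h1 h2 h3
    rw [kmpGo, if_neg (by omega)]
    simp [show t.length - i = 0 by omega]
  | succ n ihn =>
    intro i j count h1 h2 hjdef
    by_cases h : i < t.length
    · have hjm : j < p.length := by
        have := maxPS_le p (t.take i) (p.length - 1)
        omega
      have hsuf : p.take j <:+ t.take i := hjdef ▸ maxPS_suffix p (t.take i) (p.length - 1)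
      have htake : t.take (i + 1) = t.take i ++ [t.getD i ' '] := take_snoc t i h
      have hr : chase p lps (t.getD i ' ') j =
          Nat.findGreatest (fun k => p.take k <:+ t.take i ++ [t.getD i ' ']) (j + 1) :=
        chase_spec p lps (t.take i) (t.getD i ' ') hm j hjm hsuf (fun x hx => hlps x (by omega))
      have hrfull : chase p lps (t.getD i ' ') j = maxPS p (t.take (i + 1)) p.length := by
        rw [hr]
        unfold maxPS
        simp only [htake]
        symm
        apply findGreatest_trim _ _ _ (by omega)
        intro k hk1 hk2 hP
        rw [take_suffix_snoc p (t.take i) (t.getD i ' ') k (by omega) (by omega)] at hP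
        have : k - 1 ≤ j :=
          hjdef ▸ maxPS_greatest p (t.take i) (p.length - 1) (k - 1) (by omega) hP.1
        omega
      have hocc : (p <:+ t.take (i + 1)) ↔ maxPS p (t.take (i + 1)) p.length = p.length := by
        constructor
        · intro hs
          refine Nat.le_antisymm (maxPS_le _ _ _) (maxPS_greatest _ _ _ _ le_rfl ?_)
          simpa [List.take_length] using hs
        · intro he
          have := maxPS_suffix p (t.take (i + 1)) p.length
          rwa [he, List.take_length] at this
      have hrange : List.range' i (t.length - i) = i :: List.range' (i + 1) (t.length - (i + 1)) := by
        rw [show t.length - i = (t.length - (i + 1)) + 1 by omega, List.range'_succ]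
      rw [kmpGo, if_pos h]
      by_cases hfull : chase p lps (t.getD i ' ') j = p.length
      · rw [if_pos hfull]
        have hoccT : p <:+ t.take (i + 1) := hocc.mpr (hrfull ▸ hfull)
        have hnew : min (lps.getD (p.length - 1) 0) (p.length - 1) =
            maxPS p (t.take (i + 1)) (p.length - 1) := by
          have e : maxPS p (t.take (i + 1)) (p.length - 1) = mb p p.length := by
            unfold mb maxPS
            apply findGreatest_congr
            intro k hk1 hk2
            rw [List.take_length]
            constructor
            · intro hs
              exact List.suffix_of_suffix_length_le hs hoccT (by simp [List.length_take])
            · intro hs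
              exact hs.trans hoccT
          have hlv := hlps (p.length - 1) (by omega)
          rw [Nat.sub_add_cancel hm] at hlv
          have := mb_le p p.length
          rw [e, hlv]
          omega
        rw [ihn (i + 1) _ (count + 1) (by omega) (by omega) hnew]
        rw [hrange, List.countP_cons]
        have hQ : p.isSuffixOf (t.take (i + 1)) = true := by
          rw [List.isSuffixOf_iff_suffix]
          exact hoccT
        simp [hQ]
        omega
      · rw [if_neg hfull]
        have hnew : chase p lps (t.getD i ' ') j = maxPS p (t.take (i + 1)) (p.length - 1) := by
          have hnP : ¬ ((fun k => p.take k <:+ t.take (i + 1)) p.length) := by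
            intro hP
            exact hfull (by
              rw [hrfull]
              exact Nat.le_antisymm (maxPS_le _ _ _) (Nat.le_findGreatest le_rfl hP))
          rw [hrfull]
          unfold maxPS
          conv_lhs => rw [show p.length = (p.length - 1) + 1 by omega]
          rw [Nat.findGreatest_succ, if_neg (by rw [Nat.sub_add_cancel hm]; exact hnP)]
        rw [ihn (i + 1) _ count (by omega) (by omega) hnew]
        rw [hrange, List.countP_cons]
        have hQ : p.isSuffixOf (t.take (i + 1)) = false := by
          rw [Bool.eq_false_iff, Ne, List.isSuffixOf_iff_suffix]
          intro hs
          exact hfull (hrfull ▸ hocc.mp hs)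
        simp [hQ]
    · rw [kmpGo, if_neg h]
      simp [show t.length - i = 0 by omega]

-- reindexing: suffix occurrences over prefixes = sliding-window matches
lemma count_shift (p t : List Char) (hm : 0 < p.length) :
    (List.range t.length).countP (fun x => p.isSuffixOf (t.take (x + 1))) =
    (List.range (t.length + 1 - p.length)).countP (fun i => (t.drop i).take p.length == p) := by
  have window : ∀ a : Nat, a + p.length ≤ t.length →
      (p.isSuffixOf (t.take (a + p.length)) = ((t.drop a).take p.length == p)) := by
    intro a ha
    have hlen : (t.take (a + p.length)).length = a + p.length := by
      rw [List.length_take]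
      omega
    have e : (t.take (a + p.length)).drop a = (t.drop a).take p.length := by
      rw [List.drop_take]
      congr 1
      omega
    have hiff : p <:+ t.take (a + p.length) ↔ (t.drop a).take p.length = p := by
      rw [List.suffix_iff_eq_drop, hlen, show a + p.length - p.length = a by omega, e]
      exact eq_comm
    rw [Bool.eq_iff_iff, List.isSuffixOf_iff_suffix, beq_iff_eq]
    exact hiff
  by_cases hmn : p.length ≤ t.length
  · have hsplit : t.length = (p.length - 1) + (t.length + 1 - p.length) := by omega
    conv_lhs => rw [hsplit, List.range_add]
    rw [List.countP_append, List.countP_map]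
    have h0 : (List.range (p.length - 1)).countP (fun x => p.isSuffixOf (t.take (x + 1))) = 0 := by
      apply List.countP_eq_zero.mpr
      intro a ha
      rw [List.mem_range] at ha
      simp only [List.isSuffixOf_iff_suffix]
      intro hs
      have := hs.length_le
      rw [List.length_take] at this
      omega
    rw [h0, Nat.zero_add]
    apply List.countP_congr
    intro a ha
    rw [List.mem_range] at ha
    have h1 : p.length - 1 + a + 1 = a + p.length := by omega
    simp only [Function.comp]
    rw [h1, window a (by omega)]
  · rw [show t.length + 1 - p.length = 0 by omega]
    simp only [List.range_zero, List.countP_nil]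
    apply List.countP_eq_zero.mpr
    intro a ha
    rw [List.mem_range] at ha
    simp only [List.isSuffixOf_iff_suffix]
    intro hs
    have := hs.length_le
    rw [List.length_take] at this
    omega

-- list-level assembly
lemma main_eq (p t : List Char) (hm : 0 < p.length) :
    (kmpLoop p t (buildLpsLoop p (List.replicate p.length 0) 0 1)
      (by omega) 0 0 0 : Nat) =
    (List.range (t.length + 1 - p.length)).countP (fun i => (t.drop i).take p.length == p) := by
  rw [kmp_eq_go p t (buildLpsLoop p (List.replicate p.length 0) 0 1) (by omega) 0 0 0 hm]
  rw [kmpGo_eq p t (buildLpsLoop p (List.replicate p.length 0) 0 1) hm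
    (lps_correct p hm) t.length 0 0 0 (by omega) (by omega)
    (by rw [List.take_zero, maxPS_nil p _ hm])]
  rw [Nat.zero_add, Nat.sub_zero, ← List.range_eq_range']
  exact count_shift p t hm

-- ===== VERDICT (by name: the statement is the Claim_ definition above) =====
theorem search_phrase_kmp_spec : Claim_equal_search_phrase_kmp := by
  intro phrase text _
  unfold Spec_search_phrase_kmp search_phrase_kmp search_phrase_kmp_alt
  by_cases hp : (PySem.Str.lower phrase).toList = []
  · simp [hp]
  · simp only [hp]
    exact_mod_cast congrArg (Int.ofNat) (main_eq _ _ (by simpa [List.length_pos_iff] using hp))
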